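-- pv_equiv track=rewrite | github.com/achyutreddy24/AbDevWeb | MakeHTML.py | highlightLetter
-- ===== SOURCE A (Python) =====
-- def highlightLetter(str, indexDict, highlight=False):
--     htmSecondChainColor = '<font color="{Color}">{Letter}</font>'
--     htmBackgroundColor = '<span style="background-color: {Color}">{Letter}</span>'
--     newStrlst = []
--     for x in range(len(str)):
--         if x in indexDict:
--             if highlight is True:
--                 newHTML = htmBackgroundColor.format(Color = indexDict[x], Letter = str[x])
--             if highlight is False:
--                 newHTML = htmSecondChainColor.format(Color = indexDict[x], Letter = str[x])
--             newStrlst.append(newHTML)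
--         else:
--             newStrlst.append(str[x])
--     newStr = "".join(newStrlst)
--     return newStr
-- ===== SOURCE B (Python) =====
-- def highlightLetter(str, indexDict, highlight=False):
--     # Walk only the highlighted positions, copying the untouched gaps as slices.
--     keys = sorted(k for k in indexDict if 0 <= k < len(str))
--     parts = []
--     prev = 0
--     for k in keys:
--         parts.append(str[prev:k])
--         if highlight is True:
--             parts.append('<span style="background-color: {}">{}</span>'.format(indexDict[k], str[k]))
--         else:
--             parts.append('<font color="{}">{}</font>'.format(indexDict[k], str[k]))
--         prev = k + 1
--     parts.append(str[prev:])
--     return "".join(parts)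
-- ===== Notes on version B (the rewrite author's own statement) =====
-- stated objective: alternative
-- what changed: A scans every character position and asks whether it is a highlighted index; B instead sorts the in-range keys and walks them with a running cursor, copying each untouched gap between keys as a whole slice and wrapping only the keyed characters.
import Mathlib
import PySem

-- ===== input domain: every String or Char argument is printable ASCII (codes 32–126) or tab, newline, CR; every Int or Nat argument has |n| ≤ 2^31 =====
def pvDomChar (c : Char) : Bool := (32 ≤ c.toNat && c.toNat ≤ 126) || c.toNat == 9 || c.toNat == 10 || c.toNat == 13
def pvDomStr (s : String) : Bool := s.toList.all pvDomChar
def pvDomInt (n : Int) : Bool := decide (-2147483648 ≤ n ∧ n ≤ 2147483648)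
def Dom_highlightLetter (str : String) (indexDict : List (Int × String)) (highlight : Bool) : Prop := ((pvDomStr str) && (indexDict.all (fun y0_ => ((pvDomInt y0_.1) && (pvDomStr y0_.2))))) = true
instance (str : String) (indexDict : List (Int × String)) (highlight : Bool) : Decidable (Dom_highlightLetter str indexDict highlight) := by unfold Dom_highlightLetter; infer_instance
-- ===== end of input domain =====

-- B replaces A's scan over every character position ("is this index a key?") by a walk over
-- the sorted in-range keys, copying each untouched gap between keys as one whole slice
-- (objective: alternative decomposition; same return value).

-- shared HTML templates: Python's htmBackgroundColor / htmSecondChainColor .format(...), on code points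
def pvWrap (col : String) (c : Char) (highlight : Bool) : List Char :=
  if highlight then
    "<span style=\"background-color: ".toList ++ col.toList ++ "\">".toList ++ [c] ++ "</span>".toList
  else
    "<font color=\"".toList ++ col.toList ++ "\">".toList ++ [c] ++ "</font>".toList

-- ===== PORT A =====
def highlightLetter (str : String) (indexDict : List (Int × String)) (highlight : Bool) : String :=
  let d := PySem.Dict.ofList indexDict
  let cs := str.toList
  let newStrlst : List (List Char) :=
    (PySem.List.pyRange 0 (cs.length : Int) 1).foldl (fun acc x =>
      if d.contains x then
        acc ++ [pvWrap ((d.get? x).getD "") ((PySem.List.pyGet? cs x).getD ' ') highlight]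
      else
        acc ++ [[(PySem.List.pyGet? cs x).getD ' ']]) []
  String.ofList (PySem.Chars.join [] newStrlst)

-- ===== PORT B =====
def highlightLetter_alt (str : String) (indexDict : List (Int × String)) (highlight : Bool) : String :=
  let d := PySem.Dict.ofList indexDict
  let cs := str.toList
  let keys := PySem.List.sorted
    (d.keys.filter (fun k => decide (0 ≤ k) && decide (k < (cs.length : Int)))) (fun k => k) false
  let res := keys.foldl (fun (st : List (List Char) × Int) k =>
      (st.1 ++ [PySem.List.slice cs (some st.2) (some k),
                pvWrap ((d.get? k).getD "") ((PySem.List.pyGet? cs k).getD ' ') highlight],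
       k + 1)) ([], 0)
  String.ofList (PySem.Chars.join [] (res.1 ++ [PySem.List.slice cs (some res.2) none]))

-- ===== PRECONDITION & SPEC =====
def Spec_highlightLetter (str : String) (indexDict : List (Int × String)) (highlight : Bool) (out : String) : Prop := out = highlightLetter_alt str indexDict highlight
instance (str : String) (indexDict : List (Int × String)) (highlight : Bool) (out : String) : Decidable (Spec_highlightLetter str indexDict highlight out) := by unfold Spec_highlightLetter; infer_instance

-- ===== CLAIM (what is proved, stated in full; the proofs are below) =====
def Claim_equal_highlightLetter : Prop := ∀ (str : String) (indexDict : List (Int × String)) (highlight : Bool), Dom_highlightLetter str indexDict highlight → Spec_highlightLetter str indexDict highlight (highlightLetter str indexDict highlight)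

-- ===== LEMMAS AND PROOFS =====

-- what A produces at one index
def pvPiece (d : PySem.Dict Int String) (cs : List Char) (h : Bool) (x : Int) : List Char :=
  if d.contains x then pvWrap ((d.get? x).getD "") ((PySem.List.pyGet? cs x).getD ' ') h
  else [(PySem.List.pyGet? cs x).getD ' ']

-- a slice of length m+1 starting at a, as head :: tail
lemma pvSliceCons (cs : List Char) (a : Int) (m : Nat) (h0 : 0 ≤ a) (hlt : a + (m+1) ≤ (cs.length:Int)) :
    PySem.List.slice cs (some a) (some (a + (m+1))) = cs[a.toNat]'(by omega) :: PySem.List.slice cs (some (a+1)) (some (a + (m+1))) := by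
  rw [PySem.List.slice_toNat cs h0 (by omega), PySem.List.slice_toNat cs (by omega) (by omega)]
  have ha : a.toNat < cs.length := by omega
  have h1 : (a+1).toNat = a.toNat + 1 := by omega
  rw [List.drop_eq_getElem_cons ha]
  have h2 : (a + (m+1)).toNat - a.toNat = ((a + (m+1)).toNat - (a+1).toNat) + 1 := by omega
  rw [h2, List.take_succ_cons, h1]

-- over a key-free interval [a, a+m) A's pieces are just the characters, i.e. the slice
lemma pvGap (d : PySem.Dict Int String) (cs : List Char) (h : Bool) :
    ∀ (m : Nat) (a : Int), 0 ≤ a → a + m ≤ (cs.length : Int) →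
    (∀ x, a ≤ x → x < a + m → d.contains x = false) →
    ((PySem.List.pyRange a (a + m)).map (pvPiece d cs h)).flatten
      = PySem.List.slice cs (some a) (some (a + m)) := by
  intro m
  induction m with
  | zero =>
    intro a h0 _ _
    simp only [Nat.cast_zero, add_zero]
    rw [PySem.List.slice_toNat cs h0 h0]
    simp [PySem.List.pyRange]
  | succ m ih =>
    intro a h0 hle hnone
    rw [PySem.List.pyRange_one_cons (by omega)]
    have hc : d.contains a = false := hnone a le_rfl (by omega)
    have hget : PySem.List.pyGet? cs a = some (cs[a.toNat]'(by omega)) :=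
      PySem.List.pyGet?_eq_some_getElem cs h0 (by omega)
    have hrest := ih (a + 1) (by omega) (by omega)
      (fun x hx1 hx2 => hnone x (by omega) (by push_cast at hx2 ⊢; omega))
    push_cast
    rw [List.map_cons, List.flatten_cons]
    have harg : a + 1 + (m : Int) = a + ((m : Int) + 1) := by ring
    push_cast at hrest
    rw [harg] at hrest
    rw [hrest]
    rw [pvSliceCons cs a m h0 (by push_cast at hle; omega)]
    simp [pvPiece, hc, hget]

-- B's fold over a sorted key list, started at cursor a, produces A's pieces for [a, len)
lemma pvMain (d : PySem.Dict Int String) (cs : List Char) (h : Bool) :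
    ∀ (keys : List Int) (a : Int) (acc : List (List Char)),
    0 ≤ a → a ≤ (cs.length : Int) →
    keys.Pairwise (· < ·) →
    (∀ k ∈ keys, a ≤ k ∧ k < (cs.length : Int) ∧ d.contains k = true) →
    (∀ x : Int, a ≤ x → x < (cs.length : Int) → d.contains x = true → x ∈ keys) →
    (keys.foldl (fun (st : List (List Char) × Int) k =>
        (st.1 ++ [PySem.List.slice cs (some st.2) (some k),
                  pvWrap ((d.get? k).getD "") ((PySem.List.pyGet? cs k).getD ' ') h],
         k + 1)) (acc, a)).1.flatten
      ++ PySem.List.slice cs (some (keys.foldl (fun (st : List (List Char) × Int) k =>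
        (st.1 ++ [PySem.List.slice cs (some st.2) (some k),
                  pvWrap ((d.get? k).getD "") ((PySem.List.pyGet? cs k).getD ' ') h],
         k + 1)) (acc, a)).2) none
      = acc.flatten ++ ((PySem.List.pyRange a (cs.length : Int)).map (pvPiece d cs h)).flatten := by
  intro keys
  induction keys with
  | nil =>
    intro a acc h0 hn _ _ hall
    simp only [List.foldl_nil]
    have hgap := pvGap d cs h ((cs.length : Int) - a).toNat a h0 (by omega)
      (fun x hx1 hx2 => by
        by_contra hcon
        have := hall x hx1 (by omega) (by revert hcon; cases d.contains x <;> simp)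
        simp at this)
    have harg : a + (((cs.length : Int) - a).toNat : Int) = (cs.length : Int) := by omega
    rw [harg] at hgap
    rw [hgap]
    congr 1
    rw [PySem.List.slice_from cs h0, PySem.List.slice_toNat cs h0 (by omega)]
    rw [List.take_of_length_le (by simp)]
  | cons k ks ih =>
    intro a acc h0 hn hpw hmem hall
    obtain ⟨hak, hkn, hck⟩ := hmem k List.mem_cons_self
    simp only [List.foldl_cons]
    rw [ih (k+1) (acc ++ [PySem.List.slice cs (some a) (some k),
          pvWrap ((d.get? k).getD "") ((PySem.List.pyGet? cs k).getD ' ') h])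
        (by omega) (by omega) (List.Pairwise.of_cons hpw)
        (fun k' hk' => ⟨by have := (List.pairwise_cons.mp hpw).1 k' hk'; omega,
                        (hmem k' (List.mem_cons_of_mem _ hk')).2.1,
                        (hmem k' (List.mem_cons_of_mem _ hk')).2.2⟩)
        (fun x hx1 hx2 hx3 => by
          have := hall x (by omega) hx2 hx3
          rcases List.mem_cons.mp this with rfl | hxs
          · omega
          · exact hxs)]
    rw [List.flatten_append]
    rw [PySem.List.pyRange_one_append a k (cs.length : Int) hak (by omega)]
    rw [PySem.List.pyRange_one_cons hkn, List.map_append, List.map_cons,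
        List.flatten_append, List.flatten_cons]
    have hgap := pvGap d cs h (k - a).toNat a h0 (by omega)
      (fun x hx1 hx2 => by
        by_contra hcon
        have hx2' : x < k := by omega
        have := hall x hx1 (by omega) (by revert hcon; cases d.contains x <;> simp)
        rcases List.mem_cons.mp this with rfl | hxs
        · omega
        · have := (List.pairwise_cons.mp hpw).1 x hxs; omega)
    have harg : a + ((k - a).toNat : Int) = k := by omega
    rw [harg] at hgap
    rw [hgap]
    have hpk : pvPiece d cs h k
        = pvWrap ((d.get? k).getD "") ((PySem.List.pyGet? cs k).getD ' ') h := by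
      simp [pvPiece, hck]
    rw [hpk]
    simp

-- "".join on code-point lists is flatten
lemma pvJoinNil (xss : List (List Char)) : PySem.Chars.join [] xss = xss.flatten := by
  show List.intercalate [] xss = xss.flatten
  simp [List.intercalate]
  induction xss with
  | nil => simp
  | cons x xs ih => cases xs <;> simp_all [List.intersperse]

-- the two bodies agree for any dict with distinct keys
lemma pvCore (d : PySem.Dict Int String) (cs : List Char) (highlight : Bool)
    (hnd : d.keys.Nodup) :
    String.ofList (PySem.Chars.join []
      ((PySem.List.pyRange 0 (cs.length : Int) 1).foldl (fun acc x =>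
        if d.contains x then
          acc ++ [pvWrap ((d.get? x).getD "") ((PySem.List.pyGet? cs x).getD ' ') highlight]
        else
          acc ++ [[(PySem.List.pyGet? cs x).getD ' ']]) []))
    = String.ofList (PySem.Chars.join []
      (((PySem.List.sorted (d.keys.filter (fun k => decide (0 ≤ k) && decide (k < (cs.length : Int)))) (fun k => k) false).foldl
          (fun (st : List (List Char) × Int) k =>
            (st.1 ++ [PySem.List.slice cs (some st.2) (some k),
                      pvWrap ((d.get? k).getD "") ((PySem.List.pyGet? cs k).getD ' ') highlight],
             k + 1)) ([], 0)).1
        ++ [PySem.List.slice cs (some ((PySem.List.sorted (d.keys.filter (fun k => decide (0 ≤ k) && decide (k < (cs.length : Int)))) (fun k => k) false).foldl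
          (fun (st : List (List Char) × Int) k =>
            (st.1 ++ [PySem.List.slice cs (some st.2) (some k),
                      pvWrap ((d.get? k).getD "") ((PySem.List.pyGet? cs k).getD ' ') highlight],
             k + 1)) ([], 0)).2) none])) := by
  set keys := PySem.List.sorted
    (d.keys.filter (fun k => decide (0 ≤ k) && decide (k < (cs.length : Int)))) (fun k => k) false with hk
  have hA : (PySem.List.pyRange 0 (cs.length : Int) 1).foldl (fun acc x =>
      if d.contains x then
        acc ++ [pvWrap ((d.get? x).getD "") ((PySem.List.pyGet? cs x).getD ' ') highlight]
      else
        acc ++ [[(PySem.List.pyGet? cs x).getD ' ']]) ([] : List (List Char))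
      = (PySem.List.pyRange 0 (cs.length : Int) 1).map (pvPiece d cs highlight) := by
    rw [PySem.List.foldl_congr_mem _ _
      (fun acc x => acc ++ [pvPiece d cs highlight x]) _
      (fun acc x _ => by by_cases hc : d.contains x <;> simp [pvPiece, hc])]
    rw [PySem.List.foldl_append_singleton_eq_map]
    simp
  have hnodup : keys.Nodup :=
    (PySem.List.sorted_perm
      (d.keys.filter (fun k => decide (0 ≤ k) && decide (k < (cs.length : Int)))) (fun k => k) false).symm.nodup
      (hnd.filter _)
  have hpw : keys.Pairwise (· < ·) := by
    have hle := PySem.List.sorted_pairwise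
      (d.keys.filter (fun k => decide (0 ≤ k) && decide (k < (cs.length : Int)))) (fun k => k)
    exact (hle.and hnodup).imp (fun hab => lt_of_le_of_ne hab.1 hab.2)
  have hmemkeys : ∀ k : Int, k ∈ keys ↔ (0 ≤ k ∧ k < (cs.length : Int) ∧ d.contains k = true) := by
    intro k
    rw [hk, PySem.List.mem_sorted, List.mem_filter]
    rw [PySem.Dict.contains_iff_mem_keys]
    simp; tauto
  have hmain := pvMain d cs highlight keys 0 [] le_rfl (by positivity) hpw
    (fun k hkk => by have := (hmemkeys k).mp hkk; exact ⟨this.1, this.2.1, this.2.2⟩)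
    (fun x hx1 hx2 hx3 => (hmemkeys x).mpr ⟨hx1, hx2, hx3⟩)
  rw [hA]
  congr 1
  rw [pvJoinNil, pvJoinNil]
  simp only [List.flatten_append, List.flatten_cons, List.flatten_nil, List.append_nil] at hmain ⊢
  rw [hmain]
  simp

-- ===== VERDICT (by name: the statement is the Claim_ definition above) =====
theorem highlightLetter_spec : Claim_equal_highlightLetter := by
  intro str indexDict highlight _
  unfold Spec_highlightLetter
  exact pvCore (PySem.Dict.ofList indexDict) str.toList highlight (PySem.Dict.nodup_keys_ofList indexDict)
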